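-- pv_equiv track=rewrite | github.com/ZiadJanpih/Data_Protection_and_Privacy | KDgree.py | DPA_GetAnonymizedDegrees_Optimized_memorized
-- ===== SOURCE A (Python) =====
-- import operator
--
-- def Identical(d):
--     cost =sum(d[0][1]-d[i][1] for i in range(len(d)))
--     I = [(d[i][0],d[0][1]) for i in range(len(d))]
--     return cost, I
--
-- def DPA_GetAnonymizedDegrees_Optimized_memorized(d, k,cache=dict()):
--     if not cache :
--         cache = dict()
--
--     nodesCount = len(d)
--
--     if  nodesCount < 2*k:
--         return Identical(d)
--     else:
--         pairs=[]
--         min_t=max(k,(nodesCount - 2*k+1))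
--         for t in range( min_t , nodesCount-k+1 , 1):
--             if (t,nodesCount) in cache.keys():
--                 record_found = cache.get((t, nodesCount))
--                 t_cost, anonymized_t = record_found[0], record_found[1]
--             else:
--                 DAcost,DA_d =DPA_GetAnonymizedDegrees_Optimized_memorized(d[0:t],k,cache)
--                 DA_Icost,DA_Id=Identical(d[t:nodesCount])
--                 All_cost=DAcost+DA_Icost
--                 All_d=DA_d+DA_Id
--                 Icost,Id=Identical(d[0:nodesCount])
--                 if(All_cost >Icost ):
--                     t_cost,anonymized_t=Icost,Id
--                 else:
--                     t_cost,anonymized_t=All_cost,All_d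
--                 cache[(t, nodesCount)] = (t_cost,anonymized_t)
--             pairs.append((t_cost,anonymized_t))
--
--         return   min(pairs, key=operator.itemgetter(0))
-- ===== SOURCE B (Python) =====
-- def DPA_GetAnonymizedDegrees_Optimized_memorized(d, k, cache=dict()):
--     # Bottom-up DP over prefix lengths: prefix-sum O(1) group costs, one Int-encoded
--     # backpointer per prefix, and an iterative back-to-front reconstruction at the end.
--     # The supplied cache is consulted read-only (A mutates it in place).
--     n = len(d)
--     S = [0] * (n + 1)
--     i = 0
--     while i < n:
--         S[i + 1] = S[i] + d[i][1]
--         i += 1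
--
--     def icost(a, b):
--         return (b - a) * d[a][1] - (S[b] - S[a]) if b > a else 0
--
--     # back[m]: -1 => make prefix [0,m) identical; -t-2 => copy cache[(t, m)];
--     #          t >= 0 => split at t (prefix [0,t) anonymized, group [t,m) identical)
--     cost = [0] * (n + 1)
--     back = [-1] * (n + 1)
--     m = 1
--     while m <= n:
--         if m < 2 * k:
--             cost[m] = icost(0, m)
--             back[m] = -1
--         else:
--             bc, bb = None, 0
--             t = max(k, m - 2 * k + 1)
--             while t <= m - k:
--                 e = cache.get((t, m))
--                 if e is not None:
--                     c, b = e[0], -t - 2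
--                 else:
--                     allc = cost[t] + icost(t, m)
--                     ic = icost(0, m)
--                     if allc > ic:
--                         c, b = ic, -1
--                     else:
--                         c, b = allc, t
--                 if bc is None or c < bc:
--                     bc, bb = c, b
--                 t += 1
--             cost[m], back[m] = bc, bb
--         m += 1
--
--     res = []
--     m = n
--     while m > 0:
--         b = back[m]
--         if b == -1:
--             res = [(x, d[0][1]) for x, _ in d[:m]] + res
--             m = 0
--         elif b <= -2:
--             res = list(cache[(-b - 2, m)][1]) + res
--             m = 0
--         else:
--             res = [(x, d[b][1]) for x, _ in d[b:m]] + res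
--             m = b
--     return (cost[n], res)
-- ===== Notes on version B (the rewrite author's own statement) =====
-- stated objective: faster
-- what changed: Replaces the memoized top-down recursion that slices the list and concatenates full anonymized lists at every candidate split by an iterative bottom-up table pass over prefix lengths (while loops over preallocated arrays) with prefix-sum O(1) group costs and one Int-encoded backpointer per prefix, followed by an iterative back-to-front reconstruction of the output list (the supplied cache is consulted read-only; A mutates it in place).
import Mathlib
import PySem

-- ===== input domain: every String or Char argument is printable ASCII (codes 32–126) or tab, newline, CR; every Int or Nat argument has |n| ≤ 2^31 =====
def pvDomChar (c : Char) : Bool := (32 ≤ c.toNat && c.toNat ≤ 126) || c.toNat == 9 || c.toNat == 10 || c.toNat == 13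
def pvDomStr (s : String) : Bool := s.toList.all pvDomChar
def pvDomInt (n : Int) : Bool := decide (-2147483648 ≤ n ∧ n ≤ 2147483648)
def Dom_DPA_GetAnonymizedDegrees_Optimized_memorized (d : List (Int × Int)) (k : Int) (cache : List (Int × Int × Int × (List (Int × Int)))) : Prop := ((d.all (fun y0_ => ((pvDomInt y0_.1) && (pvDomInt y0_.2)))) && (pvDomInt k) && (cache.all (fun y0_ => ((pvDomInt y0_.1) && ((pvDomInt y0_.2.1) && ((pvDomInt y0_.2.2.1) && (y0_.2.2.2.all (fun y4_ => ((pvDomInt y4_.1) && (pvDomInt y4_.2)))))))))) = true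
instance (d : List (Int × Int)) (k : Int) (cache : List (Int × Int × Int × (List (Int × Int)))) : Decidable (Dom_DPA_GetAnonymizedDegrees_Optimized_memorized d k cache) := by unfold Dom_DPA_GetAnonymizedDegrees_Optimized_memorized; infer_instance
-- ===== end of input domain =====

-- B replaces A's memoized top-down recursion (which slices the list and concatenates full
-- anonymized lists at every candidate split) by a bottom-up table pass over prefix lengths
-- with prefix-sum group costs and one Int-encoded backpointer per prefix, then an iterative
-- back-to-front reconstruction; objective: faster.
-- Note on side effects: A mutates the caller's cache dict in place; B only reads it.
-- The equivalence proved here is about the RETURN value only.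

-- ===== PORT A =====

-- shared marshalling of the cache parameter (a Python dict) into a PySem.Dict
def pvCacheDict (cache : List (Int × Int × Int × (List (Int × Int)))) :
    PySem.Dict (Int × Int) (Int × List (Int × Int)) :=
  PySem.Dict.ofList (cache.map (fun e => ((e.1, e.2.1), e.2.2)))

-- Identical(d)
def pvIdentA (d : List (Int × Int)) : Int × List (Int × Int) :=
  match d with
  | [] => (0, [])
  | x :: _ => (d.foldl (fun acc p => acc + (x.2 - p.2)) 0, d.map (fun p => (p.1, x.2)))

-- one iteration of A's loop over candidate split points t: cache lookup, or the
-- recursive call (abstracted as recf) plus the two Identical groupings, then memoize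
def pvStepA (recf : List (Int × Int) → PySem.Dict (Int × Int) (Int × List (Int × Int)) →
      (Int × List (Int × Int)) × PySem.Dict (Int × Int) (Int × List (Int × Int)))
    (d : List (Int × Int))
    (st : List (Int × List (Int × Int)) × PySem.Dict (Int × Int) (Int × List (Int × Int)))
    (t : Int) :
    List (Int × List (Int × Int)) × PySem.Dict (Int × Int) (Int × List (Int × Int)) :=
  match PySem.Dict.get? st.2 (t, (d.length : Int)) with
  | some r => (st.1 ++ [r], st.2)
  | none =>
    let rec1 := recf (PySem.List.slice d (some 0) (some t)) st.2
    let ident2 := pvIdentA (PySem.List.slice d (some t) (some (d.length : Int)))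
    let identAll := pvIdentA (PySem.List.slice d (some 0) (some (d.length : Int)))
    let chosen := if rec1.1.1 + ident2.1 > identAll.1 then identAll
                  else (rec1.1.1 + ident2.1, rec1.1.2 ++ ident2.2)
    (st.1 ++ [chosen], PySem.Dict.insert rec1.2 (t, (d.length : Int)) chosen)

-- the recursive body of A, with the mutated cache threaded through as state;
-- fuel only makes the recursion structural (A diverges for k < 0; that is outside Pre_)
def pvAuxA (fuel : Nat) (d : List (Int × Int)) (k : Int)
    (cache : PySem.Dict (Int × Int) (Int × List (Int × Int))) :
    (Int × List (Int × Int)) × PySem.Dict (Int × Int) (Int × List (Int × Int)) :=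
  match fuel with
  | 0 => ((0, []), cache)
  | fuel + 1 =>
    let n : Int := d.length
    if n < 2 * k then (pvIdentA d, cache)
    else
      let res := (PySem.List.pyRange (max k (n - 2 * k + 1)) (n - k + 1) 1).foldl
        (pvStepA (fun l c => pvAuxA fuel l k c) d) ([], cache)
      -- min(pairs, key=operator.itemgetter(0)); pairs = [] raises ValueError (outside Pre_)
      ((PySem.List.min? res.1 (fun p => p.1)).getD (0, []), res.2)
  termination_by fuel

def DPA_GetAnonymizedDegrees_Optimized_memorized (d : List (Int × Int)) (k : Int) (cache : List (Int × Int × Int × (List (Int × Int)))) : Int × (List (Int × Int)) :=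
  (pvAuxA (d.length + 1) d k (pvCacheDict cache)).1

-- ===== PORT B =====
-- Source B's while loops become standalone recursions on the loop counter; its preallocated
-- arrays are Lists updated with List.set. Loop counters i, m and every array index they
-- produce are nonnegative and in range, so Nat indexing/getD matches Python exactly;
-- the split variables t, b are kept as Int (b carries a sign-encoded backpointer).

-- the prefix-sum while loop: S[i+1] = S[i] + d[i][1]
def pvSLoop (d : List (Int × Int)) (n : Nat) (i : Nat) (S : List Int) : List Int :=
  if h : i < n then
    pvSLoop d n (i + 1) (S.set (i + 1) (S.getD i 0 + (d.getD i (0, 0)).2))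
  else S
  termination_by n - i

-- icost(a, b): O(1) group cost from the prefix sums
def pvIcost2 (d : List (Int × Int)) (S : List Int) (a b : Int) : Int :=
  if b > a then
    (b - a) * (PySem.List.pyGetD d a (0, 0)).2 -
      (PySem.List.pyGetD S b 0 - PySem.List.pyGetD S a 0)
  else 0

-- the (c, b) pair of the inner loop body: cached cost (b = -t-2), or the DP cost
-- against making the whole prefix identical (b = -1)
def pvCand2 (d : List (Int × Int)) (c0 : PySem.Dict (Int × Int) (Int × List (Int × Int)))
    (S cost : List Int) (mi t : Int) : Int × Int :=
  match PySem.Dict.get? c0 (t, mi) with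
  | some e => (e.1, -t - 2)
  | none =>
    let allc := PySem.List.pyGetD cost t 0 + pvIcost2 d S t mi
    let ic := pvIcost2 d S 0 mi
    if allc > ic then (ic, -1) else (allc, t)

-- 'if bc is None or c < bc: bc, bb = c, b'
def pvMinStep {α : Type} (cand : Int × α) (best : Option (Int × α)) : Option (Int × α) :=
  match best with
  | none => some cand
  | some b => if cand.1 < b.1 then some cand else some b

-- the inner while loop over split points t (returns the final bc, bb)
def pvTLoop (d : List (Int × Int)) (c0 : PySem.Dict (Int × Int) (Int × List (Int × Int)))
    (S cost : List Int) (k mi : Int) (t : Int) (best : Option (Int × Int)) : Int × Int :=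
  if h : t ≤ mi - k then
    pvTLoop d c0 S cost k mi (t + 1) (pvMinStep (pvCand2 d c0 S cost mi t) best)
  else best.getD (0, 0)
  termination_by (mi - k + 1 - t).toNat
  decreasing_by omega

-- the outer while loop over prefix lengths m, filling cost[] and back[]
def pvMLoop (d : List (Int × Int)) (k : Int)
    (c0 : PySem.Dict (Int × Int) (Int × List (Int × Int))) (S : List Int) (n : Nat)
    (m : Nat) (cost back : List Int) : List Int × List Int :=
  if h : m ≤ n then
    if (m : Int) < 2 * k then
      pvMLoop d k c0 S n (m + 1) (cost.set m (pvIcost2 d S 0 (m : Int))) (back.set m (-1))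
    else
      let bb := pvTLoop d c0 S cost k (m : Int) (max k ((m : Int) - 2 * k + 1)) none
      pvMLoop d k c0 S n (m + 1) (cost.set m bb.1) (back.set m bb.2)
  else (cost, back)
  termination_by n + 1 - m

-- the back-to-front reconstruction while loop; fuel only makes it structural
-- (the prefix length m strictly decreases on the recursive branch)
def pvRLoop (d : List (Int × Int)) (c0 : PySem.Dict (Int × Int) (Int × List (Int × Int)))
    (back : List Int) : Nat → Int → List (Int × Int) → List (Int × Int)
  | 0, _, res => res
  | fuel + 1, m, res =>
    if m > 0 then
      let b := PySem.List.pyGetD back m 0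
      if b = -1 then
        (PySem.List.slice d (some 0) (some m)).map
          (fun p => (p.1, (PySem.List.pyGetD d 0 (0, 0)).2)) ++ res
      else if b ≤ -2 then
        -- cache[(-b - 2, m)][1]: the key is present here (b was set on a cache hit)
        (((PySem.Dict.get? c0 (-b - 2, m)).map (fun e => e.2)).getD []) ++ res
      else
        pvRLoop d c0 back fuel b
          ((PySem.List.slice d (some b) (some m)).map
            (fun p => (p.1, (PySem.List.pyGetD d b (0, 0)).2)) ++ res)
    else res

def DPA_GetAnonymizedDegrees_Optimized_memorized_alt (d : List (Int × Int)) (k : Int) (cache : List (Int × Int × Int × (List (Int × Int)))) : Int × (List (Int × Int)) :=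
  let n := d.length
  let c0 := pvCacheDict cache
  let S := pvSLoop d n 0 (List.replicate (n + 1) 0)
  let cb := pvMLoop d k c0 S n 1 (List.replicate (n + 1) 0) (List.replicate (n + 1) (-1))
  (cb.1.getD n 0, pvRLoop d c0 cb.2 (n + 1) (n : Int) [])

-- ===== PRECONDITION & SPEC =====
-- Pre_ excludes only inputs on which A does not return: for k = 0 A raises ValueError
-- (min of an empty candidate list) and for k < 0 it recurses without bound.
def Pre_DPA_GetAnonymizedDegrees_Optimized_memorized (d : List (Int × Int)) (k : Int) (cache : List (Int × Int × Int × (List (Int × Int)))) : Prop := 1 ≤ k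
instance (d : List (Int × Int)) (k : Int) (cache : List (Int × Int × Int × (List (Int × Int)))) : Decidable (Pre_DPA_GetAnonymizedDegrees_Optimized_memorized d k cache) := by unfold Pre_DPA_GetAnonymizedDegrees_Optimized_memorized; infer_instance

def pvWitness_DPA_GetAnonymizedDegrees_Optimized_memorized : (List (Int × Int)) × Int × (List (Int × Int × Int × (List (Int × Int)))) := ([(1, 3), (2, 2), (3, 1), (4, 1)], 2, [])

def Spec_DPA_GetAnonymizedDegrees_Optimized_memorized (d : List (Int × Int)) (k : Int) (cache : List (Int × Int × Int × (List (Int × Int)))) (out : Int × (List (Int × Int))) : Prop := out = DPA_GetAnonymizedDegrees_Optimized_memorized_alt d k cache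
instance (d : List (Int × Int)) (k : Int) (cache : List (Int × Int × Int × (List (Int × Int)))) (out : Int × (List (Int × Int))) : Decidable (Spec_DPA_GetAnonymizedDegrees_Optimized_memorized d k cache out) := by unfold Spec_DPA_GetAnonymizedDegrees_Optimized_memorized; infer_instance

-- ===== CLAIM (what is proved, stated in full; the proofs are below) =====
def Claim_equal_DPA_GetAnonymizedDegrees_Optimized_memorized : Prop := ∀ (d : List (Int × Int)) (k : Int) (cache : List (Int × Int × Int × (List (Int × Int)))), Dom_DPA_GetAnonymizedDegrees_Optimized_memorized d k cache → Pre_DPA_GetAnonymizedDegrees_Optimized_memorized d k cache → Spec_DPA_GetAnonymizedDegrees_Optimized_memorized d k cache (DPA_GetAnonymizedDegrees_Optimized_memorized d k cache)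

-- ===== LEMMAS AND PROOFS =====

-- ---- the pure midpoint: cost+tag entries, and list reconstruction, for each prefix length ----

def pvCostI (d : List (Int × Int)) (a b : Nat) : Int :=
  (pvIdentA ((d.drop a).take (b - a))).1

def pvSeg (d : List (Int × Int)) (a b : Nat) : List (Int × Int) :=
  ((d.drop a).take (b - a)).map (fun p => (p.1, (d.getD a (0, 0)).2))

def pvMinO {α : Type} (l : List (Int × α)) : Option (Int × α) :=
  l.foldl (fun acc x => pvMinStep x acc) none

def pvEnt (d : List (Int × Int)) (k : Int)
    (c0 : PySem.Dict (Int × Int) (Int × List (Int × Int))) : Nat → Nat → Int × (Int × Int)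
  | 0, _ => (0, (0, 0))
  | fuel + 1, m =>
    if (m : Int) < 2 * k then (pvCostI d 0 m, (0, 0))
    else
      (pvMinO ((PySem.List.pyRange (max k ((m : Int) - 2 * k + 1)) ((m : Int) - k + 1) 1).map
        (fun t =>
          match PySem.Dict.get? c0 (t, (m : Int)) with
          | some e => (e.1, (1, t))
          | none =>
            let allc := (pvEnt d k c0 fuel t.toNat).1 + pvCostI d t.toNat m
            if allc > pvCostI d 0 m then (pvCostI d 0 m, ((0 : Int), (0 : Int)))
            else (allc, (2, t))))).getD (0, (0, 0))
  termination_by fuel _ => fuel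

def pvEV (d : List (Int × Int)) (k : Int)
    (c0 : PySem.Dict (Int × Int) (Int × List (Int × Int))) (m : Nat) : Int × (Int × Int) :=
  pvEnt d k c0 (m + 1) m

def pvBLd (d : List (Int × Int)) (k : Int)
    (c0 : PySem.Dict (Int × Int) (Int × List (Int × Int))) : Nat → Nat → List (Int × Int)
  | 0, _ => []
  | fuel + 1, m =>
    let tag := (pvEV d k c0 m).2
    if tag.1 = 0 then pvSeg d 0 m
    else if tag.1 = 1 then ((PySem.Dict.get? c0 (tag.2, (m : Int))).map (fun e => e.2)).getD []
    else pvBLd d k c0 fuel tag.2.toNat ++ pvSeg d tag.2.toNat m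
  termination_by fuel _ => fuel

def pvFV (d : List (Int × Int)) (k : Int)
    (c0 : PySem.Dict (Int × Int) (Int × List (Int × Int))) (m : Nat) : Int × List (Int × Int) :=
  ((pvEV d k c0 m).1, pvBLd d k c0 (m + 1) m)

def pvTagVal (d : List (Int × Int)) (k : Int)
    (c0 : PySem.Dict (Int × Int) (Int × List (Int × Int))) (m : Nat)
    (e : Int × (Int × Int)) : Int × List (Int × Int) :=
  (e.1,
    if e.2.1 = 0 then pvSeg d 0 m
    else if e.2.1 = 1 then ((PySem.Dict.get? c0 (e.2.2, (m : Int))).map (fun r => r.2)).getD []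
    else pvBLd d k c0 (e.2.2.toNat + 1) e.2.2.toNat ++ pvSeg d e.2.2.toNat m)

def pvCandV (d : List (Int × Int)) (k : Int)
    (c0 : PySem.Dict (Int × Int) (Int × List (Int × Int))) (m : Nat) (t : Int) :
    Int × List (Int × Int) :=
  match PySem.Dict.get? c0 (t, (m : Int)) with
  | some e => e
  | none =>
    let allc := (pvEV d k c0 t.toNat).1 + pvCostI d t.toNat m
    if allc > pvCostI d 0 m then (pvCostI d 0 m, pvSeg d 0 m)
    else (allc, pvBLd d k c0 (t.toNat + 1) t.toNat ++ pvSeg d t.toNat m)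

def pvCandE (d : List (Int × Int)) (k : Int)
    (c0 : PySem.Dict (Int × Int) (Int × List (Int × Int))) (m : Nat) (t : Int) :
    Int × (Int × Int) :=
  match PySem.Dict.get? c0 (t, (m : Int)) with
  | some e => (e.1, (1, t))
  | none =>
    let allc := (pvEV d k c0 t.toNat).1 + pvCostI d t.toNat m
    if allc > pvCostI d 0 m then (pvCostI d 0 m, ((0 : Int), (0 : Int)))
    else (allc, (2, t))

-- the Int encoding Source B uses for a backpointer tag
def pvEnc (e : Int × Int) : Int :=
  if e.1 = 0 then -1 else if e.1 = 1 then -e.2 - 2 else e.2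

def pvCostF (d : List (Int × Int)) (k : Int)
    (c0 : PySem.Dict (Int × Int) (Int × List (Int × Int))) (j : Nat) : Int :=
  (pvEV d k c0 j).1

def pvBackF (d : List (Int × Int)) (k : Int)
    (c0 : PySem.Dict (Int × Int) (Int × List (Int × Int))) (j : Nat) : Int :=
  pvEnc (pvEV d k c0 j).2

-- ---- arithmetic / Identical lemmas ----

lemma pvSumMapSub (l : List (Int × Int)) (c : Int) :
    (l.map (fun p => c - p.2)).sum = l.length * c - (l.map (fun p => p.2)).sum := by
  induction l with
  | nil => simp
  | cons x t ih => simp [ih]; ring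

lemma pvIdentA_cons (x : Int × Int) (t : List (Int × Int)) :
    pvIdentA (x :: t) =
      (((x :: t).length : Int) * x.2 - ((x :: t).map (fun p => p.2)).sum,
        (x :: t).map (fun p => (p.1, x.2))) := by
  have h := PySem.List.foldl_add (l := x :: t) (g := fun p => x.2 - p.2) (a := (0 : Int))
  simp only [pvIdentA]
  rw [h, pvSumMapSub]
  simp

lemma pvIdentA_eq (d : List (Int × Int)) (a b : Nat) (ha : a ≤ d.length) :
    pvIdentA ((d.drop a).take (b - a)) = (pvCostI d a b, pvSeg d a b) := by
  rcases h : (d.drop a).take (b - a) with _ | ⟨x, t⟩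
  · simp [pvCostI, pvSeg, h, pvIdentA]
  · have hlt : a < d.length := by
      by_contra hc
      have : d.drop a = [] := List.drop_eq_nil_of_le (by omega)
      simp [this] at h
    have hdrop : d.drop a = d[a] :: d.drop (a + 1) := List.drop_eq_getElem_cons hlt
    have hx : x = d[a] := by
      rcases hba : b - a with _ | n
      · simp [hba] at h
      · rw [hba, hdrop, List.take_succ_cons] at h
        simp only [List.cons.injEq] at h
        exact h.1.symm
    have hgd : d.getD a (0, 0) = d[a] := List.getD_eq_getElem d (0,0) hlt
    simp only [pvCostI, pvSeg, h, pvIdentA, hgd, ← hx]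

-- ---- first-minimum (pvMinO) lemmas ----

lemma pvMinO_gen_mem {α : Type} (l : List (Int × α)) :
    ∀ (acc : Option (Int × α)) (e : Int × α),
      l.foldl (fun acc x => pvMinStep x acc) acc = some e →
      acc = some e ∨ e ∈ l := by
  induction l with
  | nil => intro acc e h; exact Or.inl h
  | cons x t ih =>
    intro acc e h
    rcases ih _ e h with h' | h'
    · rcases acc with _ | m
      · simp [pvMinStep] at h'; simp [h']
      · simp only [pvMinStep] at h'
        split at h'
        · simp at h'; simp [h']
        · exact Or.inl h'
    · simp [h']

lemma pvMinO_mem {α : Type} (l : List (Int × α)) (e : Int × α) (h : pvMinO l = some e) :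
    e ∈ l := by
  rcases pvMinO_gen_mem l none e h with h' | h'
  · cases h'
  · exact h'

lemma pvMinO_gen_isSome {α : Type} (l : List (Int × α)) :
    ∀ (acc : Option (Int × α)), acc.isSome →
      (l.foldl (fun acc x => pvMinStep x acc) acc).isSome := by
  induction l with
  | nil => intro acc h; exact h
  | cons x t ih =>
    intro acc h
    rcases acc with _ | m
    · simp at h
    · simp only [List.foldl_cons, pvMinStep]
      apply ih
      split <;> rfl

lemma pvMinO_ne_nil {α : Type} (l : List (Int × α)) (h : l ≠ []) :
    ∃ e, pvMinO l = some e := by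
  rcases l with _ | ⟨x, t⟩
  · exact absurd rfl h
  · have := pvMinO_gen_isSome t (some x) rfl
    simp only [pvMinO, List.foldl_cons]
    exact Option.isSome_iff_exists.mp this

lemma pvMinO_map {α β : Type} (l : List (Int × α)) (f : Int × α → Int × β)
    (hf : ∀ e, (f e).1 = e.1) :
    pvMinO (l.map f) = (pvMinO l).map f := by
  suffices h : ∀ acc : Option (Int × α),
      (l.map f).foldl (fun acc x => pvMinStep x acc) (acc.map f) =
      (l.foldl (fun acc x => pvMinStep x acc) acc).map f by
    exact h none
  induction l with
  | nil => intro acc; rfl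
  | cons x t ih =>
    intro acc
    simp only [List.map_cons, List.foldl_cons]
    have hstep : pvMinStep (f x) (acc.map f) = (pvMinStep x acc).map f := by
      rcases acc with _ | m
      · rfl
      · simp only [pvMinStep, Option.map_some, hf]
        split <;> simp
    rw [hstep, ih]

lemma pvMinO_fold_shape {α β : Type} (ts : List β) (f : β → Int × α) :
    ts.foldl (fun best t => pvMinStep (f t) best) none = pvMinO (ts.map f) := by
  rw [pvMinO, List.foldl_map]

lemma pvMin?_eq {α : Type} (l : List (Int × α)) :
    PySem.List.min? l (fun p => p.1) = pvMinO l := by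
  unfold PySem.List.min? pvMinO pvMinStep
  congr 1
  funext acc x
  rcases acc with _ | m <;> rfl

-- the cache-consistency invariant threaded through A's recursion
def pvInv (d : List (Int × Int)) (k : Int)
    (c0 cache : PySem.Dict (Int × Int) (Int × List (Int × Int))) : Prop :=
  ∀ q : Int × Int, PySem.Dict.get? cache q = PySem.Dict.get? c0 q ∨
    (PySem.Dict.get? c0 q = none ∧
      PySem.Dict.get? cache q = some (pvCandV d k c0 q.2.toNat q.1))

-- ---- fuel irrelevance and tag bounds for the midpoint ----

lemma pvEnt_congr (d : List (Int × Int)) (k : Int)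
    (c0 : PySem.Dict (Int × Int) (Int × List (Int × Int))) (m : Nat) :
    ∀ f1 f2 : Nat, m < f1 → m < f2 → pvEnt d k c0 f1 m = pvEnt d k c0 f2 m := by
  induction m using Nat.strong_induction_on with
  | _ m ih =>
    intro f1 f2 h1 h2
    obtain ⟨g1, rfl⟩ : ∃ g, f1 = g + 1 := ⟨f1 - 1, by omega⟩
    obtain ⟨g2, rfl⟩ : ∃ g, f2 = g + 1 := ⟨f2 - 1, by omega⟩
    simp only [pvEnt]
    split
    · rfl
    · congr 1
      congr 1
      apply List.map_congr_left
      intro t ht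
      rw [PySem.List.mem_pyRange_one] at ht
      by_cases hk0 : k ≤ 0
      · have hcon := le_trans (le_max_right k ((m : Int) - 2 * k + 1)) ht.1
        omega
      · have hlb := le_trans (le_max_left k ((m : Int) - 2 * k + 1)) ht.1
        have htm : t.toNat < m := by omega
        rcases hc : PySem.Dict.get? c0 (t, (m : Int)) with _ | e
        · simp only
          rw [ih t.toNat htm g1 g2 (by omega) (by omega)]
        · simp only

lemma pvEV_then (d : List (Int × Int)) (k : Int)
    (c0 : PySem.Dict (Int × Int) (Int × List (Int × Int))) (m : Nat)
    (hlt : (m : Int) < 2 * k) : pvEV d k c0 m = (pvCostI d 0 m, (0, 0)) := by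
  unfold pvEV pvEnt
  rw [if_pos hlt]

lemma pvEV_else (d : List (Int × Int)) (k : Int)
    (c0 : PySem.Dict (Int × Int) (Int × List (Int × Int))) (hk : 1 ≤ k) (m : Nat)
    (hge : 2 * k ≤ (m : Int)) :
    pvEV d k c0 m =
      (pvMinO ((PySem.List.pyRange (max k ((m : Int) - 2 * k + 1)) ((m : Int) - k + 1) 1).map
        (pvCandE d k c0 m))).getD (0, (0, 0)) := by
  unfold pvEV pvEnt
  rw [if_neg (by omega)]
  congr 2
  apply List.map_congr_left
  intro t ht
  rw [PySem.List.mem_pyRange_one] at ht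
  have hlb := le_trans (le_max_left k ((m : Int) - 2 * k + 1)) ht.1
  have htm : t.toNat < m := by omega
  unfold pvCandE
  rcases hc : PySem.Dict.get? c0 (t, (m : Int)) with _ | e
  · simp only
    rw [pvEnt_congr d k c0 t.toNat m (t.toNat + 1) htm (by omega)]
    rfl
  · simp only

lemma pvRange_ne_nil (a b : Int) (hab : a < b) : PySem.List.pyRange a b 1 ≠ [] := by
  rw [PySem.List.pyRange_one_cons hab]
  simp

-- the tag of pvEV is (0,0), or (1,t)/(2,t) with k ≤ t ≤ m - k
lemma pvEV_tag_cases (d : List (Int × Int)) (k : Int)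
    (c0 : PySem.Dict (Int × Int) (Int × List (Int × Int))) (hk : 1 ≤ k) (m : Nat) :
    (pvEV d k c0 m).2 = (0, 0) ∨
    (((pvEV d k c0 m).2.1 = 1 ∨ (pvEV d k c0 m).2.1 = 2) ∧
      k ≤ (pvEV d k c0 m).2.2 ∧ (pvEV d k c0 m).2.2 ≤ (m : Int) - k) := by
  by_cases hlt : (m : Int) < 2 * k
  · rw [pvEV_then d k c0 m hlt]
    exact Or.inl rfl
  · have hge : 2 * k ≤ (m : Int) := by omega
    have hE := pvEV_else d k c0 hk m hge
    have hne : (PySem.List.pyRange (max k ((m : Int) - 2 * k + 1)) ((m : Int) - k + 1) 1).map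
        (pvCandE d k c0 m) ≠ [] := by
      have : max k ((m : Int) - 2 * k + 1) < (m : Int) - k + 1 := by
        rw [max_lt_iff]; omega
      simpa using pvRange_ne_nil _ _ this
    obtain ⟨e, he⟩ := pvMinO_ne_nil _ hne
    rw [he] at hE
    simp only [Option.getD_some] at hE
    obtain ⟨t, ht, hte⟩ := List.mem_map.mp (pvMinO_mem _ _ he)
    rw [PySem.List.mem_pyRange_one] at ht
    have hlb := le_trans (le_max_left k ((m : Int) - 2 * k + 1)) ht.1
    rw [hE, ← hte]
    unfold pvCandE
    rcases hc : PySem.Dict.get? c0 (t, (m : Int)) with _ | r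
    · simp only
      split
      · exact Or.inl rfl
      · refine Or.inr ⟨Or.inr rfl, ?_, ?_⟩ <;> simp <;> omega
    · refine Or.inr ⟨Or.inl rfl, ?_, ?_⟩ <;> simp <;> omega

lemma pvEV_tag_bound (d : List (Int × Int)) (k : Int)
    (c0 : PySem.Dict (Int × Int) (Int × List (Int × Int))) (hk : 1 ≤ k) (m : Nat)
    (h0 : (pvEV d k c0 m).2.1 ≠ 0) (h1 : (pvEV d k c0 m).2.1 ≠ 1) :
    k ≤ (pvEV d k c0 m).2.2 ∧ (pvEV d k c0 m).2.2 ≤ (m : Int) - k := by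
  rcases pvEV_tag_cases d k c0 hk m with h | h
  · exact absurd (by rw [h]) h0
  · exact h.2

lemma pvBLd_congr (d : List (Int × Int)) (k : Int)
    (c0 : PySem.Dict (Int × Int) (Int × List (Int × Int))) (hk : 1 ≤ k) (m : Nat) :
    ∀ f1 f2 : Nat, m < f1 → m < f2 → pvBLd d k c0 f1 m = pvBLd d k c0 f2 m := by
  induction m using Nat.strong_induction_on with
  | _ m ih =>
    intro f1 f2 h1 h2
    obtain ⟨g1, rfl⟩ : ∃ g, f1 = g + 1 := ⟨f1 - 1, by omega⟩
    obtain ⟨g2, rfl⟩ : ∃ g, f2 = g + 1 := ⟨f2 - 1, by omega⟩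
    simp only [pvBLd]
    split
    · rfl
    · split
      · rfl
      · rename_i h0 h1'
        have hb := pvEV_tag_bound d k c0 hk m h0 h1'
        have htm : (pvEV d k c0 m).2.2.toNat < m := by omega
        rw [ih _ htm g1 g2 (by omega) (by omega)]

-- ---- A-side: the threaded-cache recursion computes the midpoint ----

lemma pvCandV_eq_tagVal (d : List (Int × Int)) (k : Int)
    (c0 : PySem.Dict (Int × Int) (Int × List (Int × Int))) (m : Nat) (t : Int) :
    pvCandV d k c0 m t = pvTagVal d k c0 m (pvCandE d k c0 m t) := by
  unfold pvCandV pvCandE pvTagVal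
  rcases hc : PySem.Dict.get? c0 (t, (m : Int)) with _ | e
  · simp only
    split
    · simp
    · simp
  · simp [hc]

lemma pvSlice0 (d : List (Int × Int)) (m : Nat) (t : Int) (ht0 : 0 ≤ t)
    (htm : t ≤ (m : Int)) :
    PySem.List.slice (d.take m) (some 0) (some t) = d.take t.toNat := by
  rw [PySem.List.slice_zero_start, PySem.List.slice_to _ ht0, List.take_take]
  congr 1
  omega

lemma pvSliceT (d : List (Int × Int)) (m : Nat) (t : Int) (ht0 : 0 ≤ t) :
    PySem.List.slice (d.take m) (some t) (some ((m : Nat) : Int)) =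
      (d.drop t.toNat).take (m - t.toNat) := by
  rw [PySem.List.slice_toNat _ ht0 (by positivity), Int.toNat_natCast,
    List.drop_take, List.take_take, min_self]

lemma pvSliceAll (d : List (Int × Int)) (m : Nat) :
    PySem.List.slice (d.take m) (some 0) (some ((m : Nat) : Int)) = d.take m := by
  rw [PySem.List.slice_zero_start, PySem.List.slice_to _ (by positivity),
    Int.toNat_natCast, List.take_take, min_self]

lemma pvIdentA_all (d : List (Int × Int)) (m : Nat) :
    pvIdentA (d.take m) = (pvCostI d 0 m, pvSeg d 0 m) := by
  have h := pvIdentA_eq d 0 m (by omega)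
  simpa using h

lemma pvStep_spec (d : List (Int × Int)) (k : Int)
    (c0 : PySem.Dict (Int × Int) (Int × List (Int × Int))) (hk : 1 ≤ k)
    (m : Nat) (hm : m ≤ d.length)
    (recf : List (Int × Int) → PySem.Dict (Int × Int) (Int × List (Int × Int)) →
      (Int × List (Int × Int)) × PySem.Dict (Int × Int) (Int × List (Int × Int)))
    (hrec : ∀ t' : Nat, t' < m → ∀ cache, pvInv d k c0 cache →
      (recf (d.take t') cache).1 = pvFV d k c0 t' ∧ pvInv d k c0 (recf (d.take t') cache).2) :
    ∀ ts : List Int, (∀ t ∈ ts, k ≤ t ∧ t ≤ (m : Int) - k) →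
    ∀ (pairs0 : List (Int × List (Int × Int))) cache1, pvInv d k c0 cache1 →
      (ts.foldl (pvStepA recf (d.take m)) (pairs0, cache1)).1 =
        pairs0 ++ ts.map (pvCandV d k c0 m) ∧
      pvInv d k c0 (ts.foldl (pvStepA recf (d.take m)) (pairs0, cache1)).2 := by
  intro ts
  induction ts with
  | nil =>
    intro _ pairs0 cache1 hinv
    exact ⟨by simp, hinv⟩
  | cons t ts ih =>
    intro hbound pairs0 cache1 hinv
    obtain ⟨htk, htmk⟩ := hbound t List.mem_cons_self
    have hlen : ((d.take m).length : Int) = (m : Int) := by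
      rw [List.length_take, min_eq_left hm]
    obtain ⟨cache2, hc2eq, hc2inv⟩ : ∃ cache2,
        pvStepA recf (d.take m) (pairs0, cache1) t =
          (pairs0 ++ [pvCandV d k c0 m t], cache2) ∧ pvInv d k c0 cache2 := by
      unfold pvStepA
      rw [hlen]
      rcases hinv (t, (m : Int)) with hsame | ⟨hnone, hval⟩
      · rcases h0 : PySem.Dict.get? c0 (t, (m : Int)) with _ | e
        · -- cache miss: the recursive call plus the two Identical groupings
          rw [hsame, h0]
          simp only
          rw [pvSlice0 d m t (by omega) (by omega), pvSliceT d m t (by omega), pvSliceAll d m]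
          have hrec1 := hrec t.toNat (by omega) cache1 hinv
          rw [hrec1.1, pvIdentA_eq d t.toNat m (by omega), pvIdentA_all d m]
          have hch : (if ((pvFV d k c0 t.toNat).1 + (pvCostI d t.toNat m, pvSeg d t.toNat m).1 >
                (pvCostI d 0 m, pvSeg d 0 m).1)
              then (pvCostI d 0 m, pvSeg d 0 m)
              else ((pvFV d k c0 t.toNat).1 + (pvCostI d t.toNat m, pvSeg d t.toNat m).1,
                (pvFV d k c0 t.toNat).2 ++ (pvCostI d t.toNat m, pvSeg d t.toNat m).2)) =
              pvCandV d k c0 m t := by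
            unfold pvCandV
            rw [h0]
            rfl
          rw [hch]
          refine ⟨_, rfl, ?_⟩
          · intro q
            by_cases hq : q = (t, (m : Int))
            · subst hq
              right
              refine ⟨h0, ?_⟩
              rw [PySem.Dict.get?_insert_self]
              simp only [Int.toNat_natCast]
            · rw [PySem.Dict.get?_insert_of_ne _ _ hq]
              exact hrec1.2 q
        · -- hit on an entry of the initial cache
          rw [hsame, h0]
          simp only
          refine ⟨cache1, ?_, hinv⟩
          unfold pvCandV
          rw [h0]
      · -- hit on an entry this run itself has written: it is the pure candidate value
        rw [hval]
        simp only [Int.toNat_natCast]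
        exact ⟨cache1, rfl, hinv⟩
    simp only [List.foldl_cons]
    rw [hc2eq]
    obtain ⟨h1, h2⟩ := ih (fun t' ht' => hbound t' (List.mem_cons_of_mem _ ht'))
      (pairs0 ++ [pvCandV d k c0 m t]) cache2 hc2inv
    refine ⟨?_, h2⟩
    rw [h1]
    simp

lemma pvAuxA_spec (d : List (Int × Int)) (k : Int)
    (c0 : PySem.Dict (Int × Int) (Int × List (Int × Int))) (hk : 1 ≤ k) :
    ∀ (fuel m : Nat) (cache : PySem.Dict (Int × Int) (Int × List (Int × Int))),
      m ≤ d.length → m < fuel → pvInv d k c0 cache →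
      (pvAuxA fuel (d.take m) k cache).1 = pvFV d k c0 m ∧
      pvInv d k c0 (pvAuxA fuel (d.take m) k cache).2 := by
  intro fuel
  induction fuel with
  | zero => intro m cache _ h; omega
  | succ fuel ih =>
    intro m cache hm hmf hinv
    have hlen : ((d.take m).length : Int) = (m : Int) := by
      rw [List.length_take, min_eq_left hm]
    simp only [pvAuxA]
    rw [hlen]
    by_cases hlt : (m : Int) < 2 * k
    · rw [if_pos hlt]
      refine ⟨?_, hinv⟩
      rw [pvIdentA_all d m]
      unfold pvFV
      rw [pvEV_then d k c0 m hlt]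
      simp only [pvBLd, pvEV_then d k c0 m hlt]
      rfl
    · rw [if_neg hlt]
      have hge : 2 * k ≤ (m : Int) := by omega
      have hbounds : ∀ t ∈ PySem.List.pyRange (max k ((m : Int) - 2 * k + 1)) ((m : Int) - k + 1) 1,
          k ≤ t ∧ t ≤ (m : Int) - k := by
        intro t ht
        rw [PySem.List.mem_pyRange_one] at ht
        exact ⟨le_trans (le_max_left _ _) ht.1, by omega⟩
      have hrec : ∀ t' : Nat, t' < m → ∀ cache', pvInv d k c0 cache' →
          (pvAuxA fuel (d.take t') k cache').1 = pvFV d k c0 t' ∧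
          pvInv d k c0 (pvAuxA fuel (d.take t') k cache').2 := by
        intro t' ht' cache' hc'
        exact ih t' cache' (by omega) (by omega) hc'
      have hfold := pvStep_spec d k c0 hk m hm (fun l c => pvAuxA fuel l k c) hrec _ hbounds [] cache hinv
      refine ⟨?_, hfold.2⟩
      simp only
      rw [hfold.1]
      simp only [List.nil_append]
      rw [pvMin?_eq]
      have hcv : (PySem.List.pyRange (max k ((m : Int) - 2 * k + 1)) ((m : Int) - k + 1) 1).map
            (pvCandV d k c0 m) =
          ((PySem.List.pyRange (max k ((m : Int) - 2 * k + 1)) ((m : Int) - k + 1) 1).map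
            (pvCandE d k c0 m)).map (pvTagVal d k c0 m) := by
        rw [List.map_map]
        apply List.map_congr_left
        intro t _
        exact pvCandV_eq_tagVal d k c0 m t
      rw [hcv, pvMinO_map _ (pvTagVal d k c0 m) (fun e => rfl)]
      have hne : (PySem.List.pyRange (max k ((m : Int) - 2 * k + 1)) ((m : Int) - k + 1) 1).map
          (pvCandE d k c0 m) ≠ [] := by
        have hltr : max k ((m : Int) - 2 * k + 1) < (m : Int) - k + 1 := by
          rw [max_lt_iff]; omega
        simpa using pvRange_ne_nil _ _ hltr
      obtain ⟨emin, hemin⟩ := pvMinO_ne_nil _ hne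
      rw [hemin]
      simp only [Option.map_some, Option.getD_some]
      have hEV : pvEV d k c0 m = emin := by
        rw [pvEV_else d k c0 hk m hge, hemin]
        rfl
      unfold pvFV pvTagVal
      rw [hEV]
      refine Prod.ext rfl ?_
      simp only
      have hunf : pvBLd d k c0 (m + 1) m =
          (if (pvEV d k c0 m).2.1 = 0 then pvSeg d 0 m
           else if (pvEV d k c0 m).2.1 = 1 then
             ((PySem.Dict.get? c0 ((pvEV d k c0 m).2.2, (m : Int))).map (fun e => e.2)).getD []
           else pvBLd d k c0 m (pvEV d k c0 m).2.2.toNat ++ pvSeg d (pvEV d k c0 m).2.2.toNat m) := by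
        simp only [pvBLd]
      rw [hunf, hEV]
      split
      · rfl
      · split
        · rfl
        · rename_i h0 h1
          have hb := pvEV_tag_bound d k c0 hk m (by rw [hEV]; exact h0) (by rw [hEV]; exact h1)
          rw [hEV] at hb
          congr 1
          exact pvBLd_congr d k c0 hk emin.2.2.toNat (emin.2.2.toNat + 1) m (by omega) (by omega)

-- ---- B-side: the array loops compute the midpoint ----

def pvPS (d : List (Int × Int)) (i : Nat) : Int := ((d.take i).map (fun p => p.2)).sum

lemma pvPS_succ (d : List (Int × Int)) (j : Nat) (hj : j < d.length) :
    pvPS d (j + 1) = pvPS d j + (d.getD j (0, 0)).2 := by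
  unfold pvPS
  rw [List.map_take, List.map_take, List.take_succ, List.getElem?_map,
    List.getElem?_eq_getElem hj, List.getD_eq_getElem d (0, 0) hj]
  simp

-- getD / set on a '(range m).map f ++ replicate' array
lemma pvGetD_mapRange {α : Type} (f : Nat → α) (m j : Nat) (dft : α)
    (h : j < m) : (((List.range m).map f)).getD j dft = f j := by
  rw [List.getD_eq_getElem _ _ (by simpa using h)]
  simp

lemma pvGetD_prefix {α : Type} (f : Nat → α) (m j : Nat) (B : List α) (dft : α)
    (h : j < m) : (((List.range m).map f) ++ B).getD j dft = f j := by
  rw [List.getD_append _ _ _ _ (by simpa using h)]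
  exact pvGetD_mapRange f m j dft h

lemma pvSet_prefix {α : Type} (f : Nat → α) (m c : Nat) (v dft : α) (hc : 0 < c) :
    ((((List.range m).map f) ++ List.replicate c dft).set m v) =
      (((List.range (m + 1)).map (Function.update f m v)) ++ List.replicate (c - 1) dft) := by
  obtain ⟨c', rfl⟩ : ∃ c', c = c' + 1 := ⟨c - 1, by omega⟩
  rw [List.set_append_right _ _ (by simp), List.replicate_succ]
  simp only [List.length_map, List.length_range, Nat.sub_self, List.set_cons_zero]
  rw [List.range_succ, List.map_append]
  have hmap : (List.range m).map (Function.update f m v) = (List.range m).map f := by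
    apply List.map_congr_left
    intro j hj
    rw [List.mem_range] at hj
    exact Function.update_of_ne (by omega) _ _
  simp [hmap, Function.update_self]

lemma pvSLoop_spec (d : List (Int × Int)) :
    ∀ (fuel i : Nat), d.length - i ≤ fuel → i ≤ d.length →
      pvSLoop d d.length i
          (((List.range (i + 1)).map (pvPS d)) ++ List.replicate (d.length - i) 0) =
        (List.range (d.length + 1)).map (pvPS d) := by
  intro fuel
  induction fuel with
  | zero =>
    intro i hf hi
    have : i = d.length := by omega
    subst this
    rw [pvSLoop]
    simp
  | succ fuel ih =>
    intro i hf hi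
    rw [pvSLoop]
    by_cases h : i < d.length
    · rw [dif_pos h]
      have hg : (((List.range (i + 1)).map (pvPS d)) ++ List.replicate (d.length - i) 0).getD i 0
          = pvPS d i := pvGetD_prefix (pvPS d) (i + 1) i _ 0 (by omega)
      rw [hg, ← pvPS_succ d i h, pvSet_prefix (pvPS d) (i + 1) _ _ _ (by omega)]
      have hupd : (List.range (i + 1 + 1)).map (Function.update (pvPS d) (i + 1) (pvPS d (i + 1)))
          = (List.range (i + 1 + 1)).map (pvPS d) := by
        apply List.map_congr_left
        intro j _
        by_cases hj : j = i + 1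
        · subst hj; simp [Function.update_self]
        · exact Function.update_of_ne hj _ _
      rw [hupd]
      have : d.length - i - 1 = d.length - (i + 1) := by omega
      rw [this]
      exact ih (i + 1) (by omega) (by omega)
    · rw [dif_neg h]
      have : i = d.length := by omega
      subst this
      simp

lemma pvCostI_closed (d : List (Int × Int)) (a b : Nat) (hab : a < b) (hb : b ≤ d.length) :
    pvCostI d a b = ((b : Int) - (a : Int)) * (d.getD a (0, 0)).2 - (pvPS d b - pvPS d a) := by
  have ha : a < d.length := by omega
  have hsum : (((d.drop a).take (b - a)).map (fun p => p.2)).sum = pvPS d b - pvPS d a := by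
    have htk : d.take b = d.take a ++ (d.drop a).take (b - a) := by
      rw [← List.take_add]
      congr 1
      omega
    unfold pvPS
    rw [htk]
    simp
  have hlen : ((d.drop a).take (b - a)).length = b - a := by
    simp [List.length_take, List.length_drop]
    omega
  obtain ⟨n, hba⟩ : ∃ n, b - a = n + 1 := ⟨b - a - 1, by omega⟩
  have hl : (d.drop a).take (b - a) = d[a] :: (d.drop (a + 1)).take n := by
    rw [List.drop_eq_getElem_cons ha, hba, List.take_succ_cons]
  unfold pvCostI
  rw [hl, pvIdentA_cons]
  rw [← hl, hsum, hlen]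
  rw [List.getD_eq_getElem d (0, 0) ha]
  have : ((b - a : Nat) : Int) = (b : Int) - (a : Int) := by omega
  rw [this]

lemma pvIcost2_eq (d : List (Int × Int)) (a b : Nat) (hb : b ≤ d.length) :
    pvIcost2 d ((List.range (d.length + 1)).map (pvPS d)) (a : Int) (b : Int) = pvCostI d a b := by
  unfold pvIcost2
  by_cases hab : a < b
  · rw [if_pos (by exact_mod_cast hab)]
    rw [PySem.List.pyGetD_natCast, PySem.List.pyGetD_natCast, PySem.List.pyGetD_natCast]
    have hSa : ((List.range (d.length + 1)).map (pvPS d)).getD a 0 = pvPS d a :=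
      pvGetD_mapRange (pvPS d) (d.length + 1) a 0 (by omega)
    have hSb : ((List.range (d.length + 1)).map (pvPS d)).getD b 0 = pvPS d b :=
      pvGetD_mapRange (pvPS d) (d.length + 1) b 0 (by omega)
    rw [hSa, hSb, pvCostI_closed d a b hab hb]
  · rw [if_neg (by exact_mod_cast hab)]
    unfold pvCostI
    have h0 : b - a = 0 := by omega
    rw [h0]
    simp [pvIdentA]

lemma pvGetDMR {α : Type} (f : Nat → α) (n j : Nat) (dft : α) (h : j < n) :
    PySem.List.pyGetD ((List.range n).map f) (j : Int) dft = f j := by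
  rw [PySem.List.pyGetD_natCast]
  exact pvGetD_mapRange f n j dft h

-- the inner while loop is the first-minimum fold over the candidate window
lemma pvTLoop_eq (d : List (Int × Int)) (c0 : PySem.Dict (Int × Int) (Int × List (Int × Int)))
    (S cost : List Int) (k mi : Int) :
    ∀ (fuel : Nat) (t : Int) (best : Option (Int × Int)), (mi - k + 1 - t).toNat ≤ fuel →
      pvTLoop d c0 S cost k mi t best =
        ((PySem.List.pyRange t (mi - k + 1) 1).foldl
          (fun acc x => pvMinStep (pvCand2 d c0 S cost mi x) acc) best).getD (0, 0) := by
  intro fuel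
  induction fuel with
  | zero =>
    intro t best hf
    rw [pvTLoop, dif_neg (by omega), PySem.List.pyRange_one_eq_nil (by omega)]
    rfl
  | succ fuel ih =>
    intro t best hf
    rw [pvTLoop]
    by_cases h : t ≤ mi - k
    · rw [dif_pos h, PySem.List.pyRange_one_cons (by omega), List.foldl_cons]
      exact ih (t + 1) _ (by omega)
    · rw [dif_neg h, PySem.List.pyRange_one_eq_nil (by omega)]
      rfl

-- inside the window, the inner-loop candidate is the Int-encoded midpoint candidate
lemma pvCand2_eq (d : List (Int × Int)) (k : Int)
    (c0 : PySem.Dict (Int × Int) (Int × List (Int × Int))) (m : Nat) (hm : m ≤ d.length)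
    (t : Int) (ht1 : 1 ≤ t) (ht2 : t < (m : Int)) :
    pvCand2 d c0 ((List.range (d.length + 1)).map (pvPS d))
        ((List.range m).map (pvCostF d k c0) ++ List.replicate (d.length + 1 - m) 0)
        (m : Int) t =
      ((pvCandE d k c0 m t).1, pvEnc (pvCandE d k c0 m t).2) := by
  unfold pvCand2 pvCandE
  rcases hc : PySem.Dict.get? c0 (t, (m : Int)) with _ | e
  · simp only
    have htn : (t.toNat : Int) = t := by omega
    have hcost : PySem.List.pyGetD
        ((List.range m).map (pvCostF d k c0) ++ List.replicate (d.length + 1 - m) 0) t 0 =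
        (pvEV d k c0 t.toNat).1 := by
      rw [← htn, PySem.List.pyGetD_natCast]
      exact pvGetD_prefix (pvCostF d k c0) m t.toNat _ 0 (by omega)
    have hIt : pvIcost2 d ((List.range (d.length + 1)).map (pvPS d)) t (m : Int) =
        pvCostI d t.toNat m := by
      rw [← htn]; exact pvIcost2_eq d t.toNat m hm
    have hI0 : pvIcost2 d ((List.range (d.length + 1)).map (pvPS d)) 0 (m : Int) =
        pvCostI d 0 m := by
      have := pvIcost2_eq d 0 m hm
      simpa using this
    rw [hcost, hIt, hI0]
    split
    · simp [pvEnc]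
    · simp only [pvEnc]
      norm_num
  · simp [pvEnc]

-- the outer while loop fills cost[] and back[] with the midpoint values
lemma pvMLoop_spec (d : List (Int × Int)) (k : Int)
    (c0 : PySem.Dict (Int × Int) (Int × List (Int × Int))) (hk : 1 ≤ k) :
    ∀ (fuel m : Nat), 1 ≤ m → m ≤ d.length + 1 → d.length + 1 - m ≤ fuel →
      pvMLoop d k c0 ((List.range (d.length + 1)).map (pvPS d)) d.length m
          ((List.range m).map (pvCostF d k c0) ++ List.replicate (d.length + 1 - m) 0)
          ((List.range m).map (pvBackF d k c0) ++ List.replicate (d.length + 1 - m) (-1)) =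
        ((List.range (d.length + 1)).map (pvCostF d k c0),
         (List.range (d.length + 1)).map (pvBackF d k c0)) := by
  intro fuel
  induction fuel with
  | zero =>
    intro m h1 h2 hf
    have : m = d.length + 1 := by omega
    subst this
    rw [pvMLoop, dif_neg (by omega)]
    simp
  | succ fuel ih =>
    intro m h1 h2 hf
    rw [pvMLoop]
    by_cases h : m ≤ d.length
    · rw [dif_pos h]
      have hentry : (if (m : Int) < 2 * k then
            ((pvIcost2 d ((List.range (d.length + 1)).map (pvPS d)) 0 (m : Int)), (-1 : Int))
          else pvTLoop d c0 ((List.range (d.length + 1)).map (pvPS d))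
            ((List.range m).map (pvCostF d k c0) ++ List.replicate (d.length + 1 - m) 0)
            k (m : Int) (max k ((m : Int) - 2 * k + 1)) none) =
          (pvCostF d k c0 m, pvBackF d k c0 m) := by
        by_cases hlt : (m : Int) < 2 * k
        · rw [if_pos hlt]
          have hI0 : pvIcost2 d ((List.range (d.length + 1)).map (pvPS d)) 0 (m : Int) =
              pvCostI d 0 m := by
            have := pvIcost2_eq d 0 m h
            simpa using this
          rw [hI0]
          unfold pvCostF pvBackF
          rw [pvEV_then d k c0 m hlt]
          simp [pvEnc]
        · rw [if_neg hlt]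
          have hge : 2 * k ≤ (m : Int) := by omega
          rw [pvTLoop_eq d c0 _ _ k (m : Int) ((m : Int) - k + 1 - max k ((m : Int) - 2 * k + 1)).toNat
            _ none le_rfl]
          rw [pvMinO_fold_shape]
          have hmapeq : (PySem.List.pyRange (max k ((m : Int) - 2 * k + 1)) ((m : Int) - k + 1) 1).map
              (fun x => pvCand2 d c0 ((List.range (d.length + 1)).map (pvPS d))
                ((List.range m).map (pvCostF d k c0) ++ List.replicate (d.length + 1 - m) 0)
                (m : Int) x) =
              ((PySem.List.pyRange (max k ((m : Int) - 2 * k + 1)) ((m : Int) - k + 1) 1).map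
                (pvCandE d k c0 m)).map (fun e => (e.1, pvEnc e.2)) := by
            rw [List.map_map]
            apply List.map_congr_left
            intro t ht
            rw [PySem.List.mem_pyRange_one] at ht
            have hlb := le_trans (le_max_left k ((m : Int) - 2 * k + 1)) ht.1
            exact pvCand2_eq d k c0 m h t (by omega) (by omega)
          rw [hmapeq, pvMinO_map ((PySem.List.pyRange (max k ((m : Int) - 2 * k + 1))
            ((m : Int) - k + 1) 1).map (pvCandE d k c0 m))
            (fun e => (e.1, pvEnc e.2)) (fun e => rfl)]
          have hne : (PySem.List.pyRange (max k ((m : Int) - 2 * k + 1)) ((m : Int) - k + 1) 1).map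
              (pvCandE d k c0 m) ≠ [] := by
            have hltr : max k ((m : Int) - 2 * k + 1) < (m : Int) - k + 1 := by
              rw [max_lt_iff]; omega
            simpa using pvRange_ne_nil _ _ hltr
          obtain ⟨emin, hemin⟩ := pvMinO_ne_nil _ hne
          rw [hemin]
          have hEV : pvEV d k c0 m = emin := by
            rw [pvEV_else d k c0 hk m hge, hemin]
            rfl
          unfold pvCostF pvBackF
          rw [hEV]
          rfl
      by_cases hlt : (m : Int) < 2 * k
      · rw [if_pos hlt]
        have hE := hentry
        rw [if_pos hlt] at hE
        have hc : pvIcost2 d ((List.range (d.length + 1)).map (pvPS d)) 0 (m : Int) =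
            pvCostF d k c0 m := congrArg Prod.fst hE
        have hb : pvBackF d k c0 m = -1 := (congrArg Prod.snd hE).symm
        rw [hc, pvSet_prefix _ m _ _ _ (by omega), pvSet_prefix _ m _ _ _ (by omega)]
        have hupd1 : (List.range (m + 1)).map (Function.update (pvCostF d k c0) m (pvCostF d k c0 m))
            = (List.range (m + 1)).map (pvCostF d k c0) := by
          simp [Function.update_eq_self]
        have hupd2 : (List.range (m + 1)).map (Function.update (pvBackF d k c0) m (-1))
            = (List.range (m + 1)).map (pvBackF d k c0) := by
          rw [← hb]
          simp [Function.update_eq_self]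
        rw [hupd1, hupd2]
        have hc1 : d.length + 1 - m - 1 = d.length + 1 - (m + 1) := by omega
        rw [hc1]
        exact ih (m + 1) (by omega) (by omega) (by omega)
      · rw [if_neg hlt]
        have hE := hentry
        rw [if_neg hlt] at hE
        show pvMLoop _ _ _ _ _ _ ((_ : List Int).set m (pvTLoop d c0 _ _ k (m : Int) _ none).1)
          ((_ : List Int).set m (pvTLoop d c0 _ _ k (m : Int) _ none).2) = _
        rw [hE]
        rw [pvSet_prefix _ m _ _ _ (by omega), pvSet_prefix _ m _ _ _ (by omega)]
        have hupd1 : (List.range (m + 1)).map (Function.update (pvCostF d k c0) m (pvCostF d k c0 m))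
            = (List.range (m + 1)).map (pvCostF d k c0) := by
          simp [Function.update_eq_self]
        have hupd2 : (List.range (m + 1)).map (Function.update (pvBackF d k c0) m (pvBackF d k c0 m))
            = (List.range (m + 1)).map (pvBackF d k c0) := by
          simp [Function.update_eq_self]
        rw [hupd1, hupd2]
        have hc1 : d.length + 1 - m - 1 = d.length + 1 - (m + 1) := by omega
        rw [hc1]
        exact ih (m + 1) (by omega) (by omega) (by omega)
    · rw [dif_neg h]
      have : m = d.length + 1 := by omega
      subst this
      simp

lemma pvGet0 (d : List (Int × Int)) :
    PySem.List.pyGetD d (0 : Int) (0, 0) = d.getD 0 (0, 0) := by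
  rw [show (0 : Int) = ((0 : Nat) : Int) from rfl, PySem.List.pyGetD_natCast]

-- the back-to-front reconstruction loop rebuilds the midpoint's list
lemma pvRLoop_spec (d : List (Int × Int)) (k : Int)
    (c0 : PySem.Dict (Int × Int) (Int × List (Int × Int))) (hk : 1 ≤ k) :
    ∀ (fuel m : Nat), m ≤ d.length → m < fuel →
      ∀ res : List (Int × Int),
      pvRLoop d c0 ((List.range (d.length + 1)).map (pvBackF d k c0)) fuel (m : Int) res =
        pvBLd d k c0 (m + 1) m ++ res := by
  intro fuel
  induction fuel with
  | zero => intro m _ h; omega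
  | succ fuel ih =>
    intro m hm hmf res
    simp only [pvRLoop]
    have hunfB : pvBLd d k c0 (m + 1) m =
        (if (pvEV d k c0 m).2.1 = 0 then pvSeg d 0 m
         else if (pvEV d k c0 m).2.1 = 1 then
           ((PySem.Dict.get? c0 ((pvEV d k c0 m).2.2, (m : Int))).map (fun e => e.2)).getD []
         else pvBLd d k c0 m (pvEV d k c0 m).2.2.toNat ++
           pvSeg d (pvEV d k c0 m).2.2.toNat m) := by
      simp only [pvBLd]
    by_cases hm0 : 0 < m
    · rw [if_pos (by exact_mod_cast hm0)]
      rw [pvGetDMR (pvBackF d k c0) (d.length + 1) m 0 (by omega)]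
      rcases pvEV_tag_cases d k c0 hk m with htag | ⟨htag1, htagb⟩
      · -- identical prefix: back[m] = -1
        have hb : pvBackF d k c0 m = -1 := by
          unfold pvBackF
          rw [htag]
          rfl
        rw [hb, if_pos rfl, hunfB, htag]
        simp only [if_pos rfl]
        rw [PySem.List.slice_zero_start, PySem.List.slice_to _ (by positivity),
          Int.toNat_natCast, pvGet0]
        unfold pvSeg
        simp
      · have ht1 : 1 ≤ (pvEV d k c0 m).2.2 := by omega
        rcases htag1 with h1 | h2
        · -- cache hit: back[m] = -t-2
          have hb : pvBackF d k c0 m = -(pvEV d k c0 m).2.2 - 2 := by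
            unfold pvBackF pvEnc
            rw [h1]
            simp
          rw [hb, if_neg (by omega), if_pos (by omega), hunfB]
          rw [if_neg (by omega), if_pos h1]
          have : -(-(pvEV d k c0 m).2.2 - 2) - 2 = (pvEV d k c0 m).2.2 := by ring
          rw [this]
        · -- split at t: back[m] = t ≥ 1
          have hb : pvBackF d k c0 m = (pvEV d k c0 m).2.2 := by
            unfold pvBackF pvEnc
            rw [h2]
            simp
          rw [hb, if_neg (by omega), if_neg (by omega), hunfB]
          rw [if_neg (by omega), if_neg (by omega)]
          set t := (pvEV d k c0 m).2.2 with htdef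
          have htn : (t.toNat : Int) = t := by omega
          have hrec := ih t.toNat (by omega)
            (by omega)
            ((PySem.List.slice d (some ((t.toNat : Int))) (some (m : Int))).map
              (fun p => (p.1, (PySem.List.pyGetD d ((t.toNat : Int)) (0, 0)).2)) ++ res)
          rw [← htn]
          simp only [Int.toNat_natCast]
          rw [hrec]
          have hseg : (PySem.List.slice d (some ((t.toNat : Int))) (some (m : Int))).map
              (fun p => (p.1, (PySem.List.pyGetD d ((t.toNat : Int)) (0, 0)).2)) =
              pvSeg d t.toNat m := by
            rw [PySem.List.slice_natCast, PySem.List.pyGetD_natCast]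
            rfl
          rw [hseg, pvBLd_congr d k c0 hk t.toNat (t.toNat + 1) m (by omega) (by omega)]
          simp
    · have : m = 0 := by omega
      subst this
      rw [if_neg (by norm_num)]
      rw [hunfB]
      have h0 : pvEV d k c0 0 = (pvCostI d 0 0, (0, 0)) :=
        pvEV_then d k c0 0 (by omega)
      rw [h0]
      simp [pvSeg]

lemma pvAlt_eq (d : List (Int × Int)) (k : Int)
    (cache : List (Int × Int × Int × (List (Int × Int)))) (hk : 1 ≤ k) :
    DPA_GetAnonymizedDegrees_Optimized_memorized_alt d k cache =
      pvFV d k (pvCacheDict cache) d.length := by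
  simp only [DPA_GetAnonymizedDegrees_Optimized_memorized_alt]
  have hS : pvSLoop d d.length 0 (List.replicate (d.length + 1) 0) =
      (List.range (d.length + 1)).map (pvPS d) := by
    have h0 : ((List.range 1).map (pvPS d)) ++ List.replicate (d.length - 0) 0 =
        List.replicate (d.length + 1) 0 := by
      have : pvPS d 0 = 0 := by simp [pvPS]
      simp [List.range_succ, this, List.replicate_succ]
    rw [← h0]
    exact pvSLoop_spec d d.length 0 le_rfl (by omega)
  rw [hS]
  have hM : pvMLoop d k (pvCacheDict cache) ((List.range (d.length + 1)).map (pvPS d)) d.length 1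
      (List.replicate (d.length + 1) 0) (List.replicate (d.length + 1) (-1)) =
      ((List.range (d.length + 1)).map (pvCostF d k (pvCacheDict cache)),
       (List.range (d.length + 1)).map (pvBackF d k (pvCacheDict cache))) := by
    have hc0 : ((List.range 1).map (pvCostF d k (pvCacheDict cache))) ++
        List.replicate (d.length + 1 - 1) 0 = List.replicate (d.length + 1) 0 := by
      have : pvCostF d k (pvCacheDict cache) 0 = 0 := by
        unfold pvCostF
        rw [pvEV_then d k (pvCacheDict cache) 0 (by omega)]
        simp [pvCostI, pvIdentA]
      simp [List.range_succ, this, List.replicate_succ]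
    have hb0 : ((List.range 1).map (pvBackF d k (pvCacheDict cache))) ++
        List.replicate (d.length + 1 - 1) (-1) = List.replicate (d.length + 1) (-1 : Int) := by
      have : pvBackF d k (pvCacheDict cache) 0 = -1 := by
        unfold pvBackF
        rw [pvEV_then d k (pvCacheDict cache) 0 (by omega)]
        rfl
      simp [List.range_succ, this, List.replicate_succ]
    rw [← hc0, ← hb0]
    exact pvMLoop_spec d k (pvCacheDict cache) hk (d.length + 1) 1 le_rfl (by omega) (by omega)
  rw [hM]
  simp only
  have hcost : ((List.range (d.length + 1)).map (pvCostF d k (pvCacheDict cache))).getD d.length 0 =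
      pvCostF d k (pvCacheDict cache) d.length := by
    exact pvGetD_mapRange (pvCostF d k (pvCacheDict cache)) (d.length + 1) d.length 0 (by omega)
  rw [hcost, pvRLoop_spec d k (pvCacheDict cache) hk (d.length + 1) d.length le_rfl (by omega) []]
  simp [pvFV, pvCostF]

-- ===== VERDICT (by name: the statement is the Claim_ definition above) =====
theorem DPA_GetAnonymizedDegrees_Optimized_memorized_spec : Claim_equal_DPA_GetAnonymizedDegrees_Optimized_memorized := by
  intro d k cache _ hpre
  unfold Pre_DPA_GetAnonymizedDegrees_Optimized_memorized at hpre
  unfold Spec_DPA_GetAnonymizedDegrees_Optimized_memorized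
  unfold DPA_GetAnonymizedDegrees_Optimized_memorized
  have h := (pvAuxA_spec d k (pvCacheDict cache) hpre (d.length + 1) d.length
    (pvCacheDict cache) le_rfl (by omega) (fun q => Or.inl rfl)).1
  rw [List.take_length] at h
  rw [h, pvAlt_eq d k cache hpre]
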